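-- pv_equiv track=rewrite | github.com/Lefjav/kge-embeddings | src/data.py | categorize_relations
-- ===== SOURCE A (Python) =====
-- def categorize_relations(train_triples, e2type, r2id, type_CWE="CWE", type_CAPEC="CAPEC"):
--     """
--     Returns: rel_category[id] in {"direct","path","hier"}
--     direct = only crosses CWE<->CAPEC (no intra-type)
--     hier   = only intra-type and appears as parent/child (name heuristics optional)
--     path   = everything else
--
--     Filters out PATH_* pseudo-relations which are artifacts from two-hop composition.
--     """
--     from collections import defaultdict
--
--     # Create reverse mapping from relation ID to relation name
--     id2rel = {v: k for k, v in r2id.items()}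
--
--     pairs = defaultdict(set)   # r -> set of (type(h), type(t))
--     for (h,r,t) in train_triples:
--         # Filter out PATH_* pseudo-relations
--         rel_name = id2rel.get(r, "")
--         if rel_name.startswith("PATH_"):
--             continue
--         pairs[r].add((e2type[h], e2type[t]))
--
--     rel_category = {}
--     for r, ts in pairs.items():
--         if ts.issubset({(type_CWE,type_CWE), (type_CAPEC,type_CAPEC)}):
--             rel_category[r] = "hier"
--         elif ts.issubset({(type_CWE,type_CAPEC), (type_CAPEC,type_CWE)}) and \
--              not ts.intersection({(type_CWE,type_CWE),(type_CAPEC,type_CAPEC)}):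
--             rel_category[r] = "direct"
--         else:
--             rel_category[r] = "path"
--     return rel_category
-- ===== SOURCE B (Python) =====
-- def categorize_relations(train_triples, e2type, r2id, type_CWE="CWE", type_CAPEC="CAPEC"):
--     # Single pass keeping two booleans per relation instead of a set of type pairs.
--     id2rel = {v: k for k, v in r2id.items()}
--     intra = {(type_CWE, type_CWE), (type_CAPEC, type_CAPEC)}
--     cross = {(type_CWE, type_CAPEC), (type_CAPEC, type_CWE)}
--     flags = {}  # r -> (all pairs intra-type so far, all pairs cross-type so far)
--     for (h, r, t) in train_triples:
--         if id2rel.get(r, "").startswith("PATH_"):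
--             continue
--         p = (e2type[h], e2type[t])
--         ai, ac = flags.get(r, (True, True))
--         flags[r] = (ai and p in intra, ac and p in cross)
--     return {r: ("hier" if ai else "direct" if ac else "path")
--             for r, (ai, ac) in flags.items()}
-- ===== Notes on version B (the rewrite author's own statement) =====
-- stated objective: simpler
-- what changed: B drops A's per-relation set of (type,type) pairs and the second subset/intersection classification pass, instead maintaining two booleans per relation (all-pairs-intra, all-pairs-cross) in the single pass over triples and reading the category straight off the flags.
import Mathlib
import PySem

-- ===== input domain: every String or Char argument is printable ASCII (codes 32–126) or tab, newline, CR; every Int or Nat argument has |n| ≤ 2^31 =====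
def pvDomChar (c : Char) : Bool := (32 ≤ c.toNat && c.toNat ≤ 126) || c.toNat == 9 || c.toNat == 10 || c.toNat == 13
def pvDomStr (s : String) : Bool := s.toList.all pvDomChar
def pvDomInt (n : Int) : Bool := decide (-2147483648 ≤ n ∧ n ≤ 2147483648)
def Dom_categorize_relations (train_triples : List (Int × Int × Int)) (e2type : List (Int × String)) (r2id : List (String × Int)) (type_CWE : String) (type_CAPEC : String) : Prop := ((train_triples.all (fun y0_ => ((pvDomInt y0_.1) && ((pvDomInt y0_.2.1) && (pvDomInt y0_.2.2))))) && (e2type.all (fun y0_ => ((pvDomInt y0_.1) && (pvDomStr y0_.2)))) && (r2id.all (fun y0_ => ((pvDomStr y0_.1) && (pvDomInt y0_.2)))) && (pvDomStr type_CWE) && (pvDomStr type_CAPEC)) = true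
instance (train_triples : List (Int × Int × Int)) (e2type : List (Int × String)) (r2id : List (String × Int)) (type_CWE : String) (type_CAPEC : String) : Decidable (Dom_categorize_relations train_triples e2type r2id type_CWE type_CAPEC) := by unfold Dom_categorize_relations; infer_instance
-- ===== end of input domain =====

-- B replaces A's per-relation set of (type,type) pairs (and the subset/intersection post-pass)
-- by two booleans per relation maintained in one pass; objective: simpler (return value only; neither mutates).

-- ===== PORT A =====
-- shared transliteration helpers (both Pythons start with the same two lines and the same literal sets):
-- id2rel = {v: k for k, v in r2id.items()}  (r2id is a Python dict: PySem.Dict.ofList r2id)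
def pvId2Rel (r2id : List (String × Int)) : PySem.Dict Int String :=
  (PySem.Dict.ofList r2id).items.foldl (fun d kv => d.insert kv.2 kv.1) PySem.Dict.empty

-- (e2type[h], e2type[t]); get? = none exactly where Python raises KeyError (excluded by Pre_)
def pvTypePair (e2type : List (Int × String)) (h t : Int) : String × String :=
  (((PySem.Dict.ofList e2type).get? h).getD "", ((PySem.Dict.ofList e2type).get? t).getD "")

def pvIntra (cwe capec : String) : PySem.Set (String × String) :=
  PySem.Set.ofList [(cwe, cwe), (capec, capec)]
def pvCross (cwe capec : String) : PySem.Set (String × String) :=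
  PySem.Set.ofList [(cwe, capec), (capec, cwe)]

def categorize_relations (train_triples : List (Int × Int × Int)) (e2type : List (Int × String)) (r2id : List (String × Int)) (type_CWE : String) (type_CAPEC : String) : List (Int × String) :=
  let id2rel := pvId2Rel r2id
  let pairs : PySem.Dict Int (PySem.Set (String × String)) :=
    train_triples.foldl (fun d trip =>
      if PySem.Str.startswith (id2rel.getD trip.2.1 "") "PATH_" then d
      else d.insert trip.2.1
        (PySem.Set.add (d.getD trip.2.1 PySem.Set.empty) (pvTypePair e2type trip.1 trip.2.2)))
      PySem.Dict.empty
  (pairs.items.foldl (fun rc p =>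
      if PySem.Set.issubset p.2 (pvIntra type_CWE type_CAPEC) then rc.insert p.1 "hier"
      else if PySem.Set.issubset p.2 (pvCross type_CWE type_CAPEC)
              && (PySem.Set.inter p.2 (pvIntra type_CWE type_CAPEC)).isEmpty then rc.insert p.1 "direct"
      else rc.insert p.1 "path")
    (PySem.Dict.empty : PySem.Dict Int String)).items

-- ===== PORT B =====
def categorize_relations_alt (train_triples : List (Int × Int × Int)) (e2type : List (Int × String)) (r2id : List (String × Int)) (type_CWE : String) (type_CAPEC : String) : List (Int × String) :=
  let id2rel := pvId2Rel r2id
  let flags : PySem.Dict Int (Bool × Bool) :=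
    train_triples.foldl (fun f trip =>
      if PySem.Str.startswith (id2rel.getD trip.2.1 "") "PATH_" then f
      else
        let p := pvTypePair e2type trip.1 trip.2.2
        let pr := f.getD trip.2.1 (true, true)
        f.insert trip.2.1 (pr.1 && PySem.Set.contains (pvIntra type_CWE type_CAPEC) p,
                           pr.2 && PySem.Set.contains (pvCross type_CWE type_CAPEC) p))
      PySem.Dict.empty
  flags.items.map (fun q => (q.1, if q.2.1 then "hier" else if q.2.2 then "direct" else "path"))

-- ===== PRECONDITION & SPEC =====
-- Pre_ excludes exactly the inputs where Python A raises KeyError: a non-PATH_ triple whose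
-- head or tail entity is not a key of e2type (B raises the same KeyError there).
def Pre_categorize_relations (train_triples : List (Int × Int × Int)) (e2type : List (Int × String)) (r2id : List (String × Int)) (type_CWE : String) (type_CAPEC : String) : Prop :=
  ∀ trip ∈ train_triples,
    PySem.Str.startswith ((pvId2Rel r2id).getD trip.2.1 "") "PATH_" = false →
      ((PySem.Dict.ofList e2type).contains trip.1 = true ∧ (PySem.Dict.ofList e2type).contains trip.2.2 = true)
instance (train_triples : List (Int × Int × Int)) (e2type : List (Int × String)) (r2id : List (String × Int)) (type_CWE : String) (type_CAPEC : String) : Decidable (Pre_categorize_relations train_triples e2type r2id type_CWE type_CAPEC) := by unfold Pre_categorize_relations; infer_instance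

def pvWitness_categorize_relations : (List (Int × Int × Int)) × (List (Int × String)) × (List (String × Int)) × String × String :=
  ([(0, 1, 0)], [(0, "CWE")], [("rel", 1)], "CWE", "CAPEC")

def Spec_categorize_relations (train_triples : List (Int × Int × Int)) (e2type : List (Int × String)) (r2id : List (String × Int)) (type_CWE : String) (type_CAPEC : String) (out : List (Int × String)) : Prop := out = categorize_relations_alt train_triples e2type r2id type_CWE type_CAPEC
instance (train_triples : List (Int × Int × Int)) (e2type : List (Int × String)) (r2id : List (String × Int)) (type_CWE : String) (type_CAPEC : String) (out : List (Int × String)) : Decidable (Spec_categorize_relations train_triples e2type r2id type_CWE type_CAPEC out) := by unfold Spec_categorize_relations; infer_instance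

-- ===== CLAIM (what is proved, stated in full; the proofs are below) =====
def Claim_equal_categorize_relations : Prop := ∀ (train_triples : List (Int × Int × Int)) (e2type : List (Int × String)) (r2id : List (String × Int)) (type_CWE : String) (type_CAPEC : String), Dom_categorize_relations train_triples e2type r2id type_CWE type_CAPEC → Pre_categorize_relations train_triples e2type r2id type_CWE type_CAPEC → Spec_categorize_relations train_triples e2type r2id type_CWE type_CAPEC (categorize_relations train_triples e2type r2id type_CWE type_CAPEC)

-- ===== LEMMAS AND PROOFS =====

theorem pv_witness_ok :
    Dom_categorize_relations pvWitness_categorize_relations.1 pvWitness_categorize_relations.2.1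
      pvWitness_categorize_relations.2.2.1 pvWitness_categorize_relations.2.2.2.1
      pvWitness_categorize_relations.2.2.2.2 ∧
    Pre_categorize_relations pvWitness_categorize_relations.1 pvWitness_categorize_relations.2.1
      pvWitness_categorize_relations.2.2.1 pvWitness_categorize_relations.2.2.2.1
      pvWitness_categorize_relations.2.2.2.2 := by decide

-- issubset as List.all of contains
theorem pv_issubset_eq_all {α : Type} [BEq α] [LawfulBEq α] (s t : List α) :
    PySem.Set.issubset s t = s.all (fun p => PySem.Set.contains t p) := by
  cases hs : PySem.Set.issubset s t <;> cases ha : s.all (fun p => PySem.Set.contains t p) <;> try rfl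
  · exfalso
    rw [List.all_eq_true] at ha
    have : PySem.Set.issubset s t = true := by
      rw [PySem.Set.issubset_iff]
      intro x hx
      exact (PySem.Set.contains_iff _ _).mp (ha x hx)
    rw [this] at hs; simp at hs
  · exfalso
    rw [PySem.Set.issubset_iff] at hs
    rw [← Bool.not_eq_true, List.all_eq_true] at ha
    exact ha fun x hx => (PySem.Set.contains_iff _ _).mpr (hs x hx)

-- set-membership of an element of both literal sets forces cwe = capec
theorem pv_both_eq {cwe capec : String} {x : String × String}
    (h1 : x ∈ pvIntra cwe capec) (h2 : x ∈ pvCross cwe capec) : cwe = capec := by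
  rw [pvIntra, PySem.Set.mem_ofList] at h1
  rw [pvCross, PySem.Set.mem_ofList] at h2
  simp only [List.mem_cons, List.not_mem_nil, or_false] at h1 h2
  rcases h1 with h1 | h1 <;> rcases h2 with h2 | h2 <;>
    · rw [h1] at h2
      obtain ⟨ha, hb⟩ := Prod.mk.inj h2
      first | exact hb | exact ha | exact ha.symm | exact hb.symm

-- A's three-way classification of a set of pairs equals B's flag classification
theorem pv_classify_eq (cwe capec : String) (ts : PySem.Set (String × String)) :
    (if PySem.Set.issubset ts (pvIntra cwe capec) then "hier"
     else if PySem.Set.issubset ts (pvCross cwe capec)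
             && (PySem.Set.inter ts (pvIntra cwe capec)).isEmpty then "direct"
     else "path")
    = (if ts.all (fun p => PySem.Set.contains (pvIntra cwe capec) p) then "hier"
       else if ts.all (fun p => PySem.Set.contains (pvCross cwe capec) p) then "direct"
       else "path") := by
  rw [pv_issubset_eq_all, pv_issubset_eq_all]
  by_cases h1 : ts.all (fun p => PySem.Set.contains (pvIntra cwe capec) p) = true
  · rw [h1]; simp
  · rw [Bool.not_eq_true] at h1
    rw [h1]
    by_cases h2 : ts.all (fun p => PySem.Set.contains (pvCross cwe capec) p) = true
    · rw [h2]
      have hemp : PySem.Set.inter ts (pvIntra cwe capec) = [] := by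
        by_contra hne
        obtain ⟨x, hx⟩ := List.exists_mem_of_ne_nil _ hne
        rw [PySem.Set.mem_inter] at hx
        have hxc : x ∈ pvCross cwe capec := by
          rw [List.all_eq_true] at h2
          exact (PySem.Set.contains_iff _ _).mp (h2 x hx.1)
        have heq : cwe = capec := pv_both_eq hx.2 hxc
        subst heq
        rw [← Bool.not_eq_true, ← h2] at h1
        exact h1 rfl
      rw [hemp]
      simp
    · rw [Bool.not_eq_true] at h2
      rw [h2]
      simp
  
-- (Set.add s p).all q
theorem pv_all_add {α : Type} [BEq α] [LawfulBEq α] (s : PySem.Set α) (p : α) (q : α → Bool) :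
    (PySem.Set.add s p).all q = (s.all q && q p) := by
  by_cases hp : p ∈ s
  · rw [PySem.Set.add_of_mem hp]
    cases ha : s.all q
    · simp
    · rw [List.all_eq_true] at ha
      simp [ha p hp]
  · rw [PySem.Set.add_of_not_mem hp, List.all_append]
    simp

-- The loop invariant: after any prefix, the pairs-dict and the flags-dict have the same keys,
-- the keys are Nodup, and the flags are the all-intra / all-cross booleans of the pair set.
theorem pv_loop_inv (e2type : List (Int × String)) (id2rel : PySem.Dict Int String)
    (cwe capec : String) (tt : List (Int × Int × Int))
    (d : PySem.Dict Int (PySem.Set (String × String))) (f : PySem.Dict Int (Bool × Bool))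
    (hk : d.keys = f.keys) (hnd : d.keys.Nodup)
    (hv : ∀ r ts, d.get? r = some ts →
        f.get? r = some (ts.all (fun p => PySem.Set.contains (pvIntra cwe capec) p),
                         ts.all (fun p => PySem.Set.contains (pvCross cwe capec) p))) :
    (tt.foldl (fun d trip =>
        if PySem.Str.startswith (id2rel.getD trip.2.1 "") "PATH_" then d
        else d.insert trip.2.1
          (PySem.Set.add (d.getD trip.2.1 PySem.Set.empty) (pvTypePair e2type trip.1 trip.2.2))) d).keys
      = (tt.foldl (fun f trip =>
        if PySem.Str.startswith (id2rel.getD trip.2.1 "") "PATH_" then f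
        else
          let p := pvTypePair e2type trip.1 trip.2.2
          let pr := f.getD trip.2.1 (true, true)
          f.insert trip.2.1 (pr.1 && PySem.Set.contains (pvIntra cwe capec) p,
                             pr.2 && PySem.Set.contains (pvCross cwe capec) p)) f).keys
    ∧ (tt.foldl (fun d trip =>
        if PySem.Str.startswith (id2rel.getD trip.2.1 "") "PATH_" then d
        else d.insert trip.2.1
          (PySem.Set.add (d.getD trip.2.1 PySem.Set.empty) (pvTypePair e2type trip.1 trip.2.2))) d).keys.Nodup
    ∧ (∀ r ts, (tt.foldl (fun d trip =>
        if PySem.Str.startswith (id2rel.getD trip.2.1 "") "PATH_" then d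
        else d.insert trip.2.1
          (PySem.Set.add (d.getD trip.2.1 PySem.Set.empty) (pvTypePair e2type trip.1 trip.2.2))) d).get? r = some ts →
        (tt.foldl (fun f trip =>
        if PySem.Str.startswith (id2rel.getD trip.2.1 "") "PATH_" then f
        else
          let p := pvTypePair e2type trip.1 trip.2.2
          let pr := f.getD trip.2.1 (true, true)
          f.insert trip.2.1 (pr.1 && PySem.Set.contains (pvIntra cwe capec) p,
                             pr.2 && PySem.Set.contains (pvCross cwe capec) p)) f).get? r
          = some (ts.all (fun p => PySem.Set.contains (pvIntra cwe capec) p),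
                  ts.all (fun p => PySem.Set.contains (pvCross cwe capec) p))) := by
  induction tt generalizing d f with
  | nil => exact ⟨hk, hnd, hv⟩
  | cons trip rest ih =>
    simp only [List.foldl_cons]
    by_cases hs : PySem.Str.startswith (id2rel.getD trip.2.1 "") "PATH_" = true
    · rw [hs]
      simp only [if_true]
      exact ih d f hk hnd hv
    · rw [Bool.not_eq_true] at hs
      simp only [hs, Bool.false_eq_true, if_false]
      apply ih
      · -- keys stay equal
        by_cases hc : d.contains trip.2.1 = true
        · have hfc : f.contains trip.2.1 = true := by
            rw [PySem.Dict.contains_iff_mem_keys] at hc ⊢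
            rw [← hk]; exact hc
          rw [PySem.Dict.keys_insert_of_contains _ _ hc,
              PySem.Dict.keys_insert_of_contains _ _ hfc, hk]
        · rw [Bool.not_eq_true] at hc
          have hfc : f.contains trip.2.1 = false := by
            cases hfc : f.contains trip.2.1
            · rfl
            · rw [PySem.Dict.contains_iff_mem_keys, ← hk,
                  ← PySem.Dict.contains_iff_mem_keys, hc] at hfc
              exact absurd hfc (by simp)
          rw [PySem.Dict.keys_insert_of_not_contains _ _ hc,
              PySem.Dict.keys_insert_of_not_contains _ _ hfc, hk]
      · exact PySem.Dict.nodup_keys_insert _ _ _ hnd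
      · intro r ts hget
        by_cases hr : r = trip.2.1
        · subst hr
          rw [PySem.Dict.get?_insert_self] at hget
          injection hget with hts
          rw [PySem.Dict.get?_insert_self]
          cases hd : d.get? trip.2.1 with
          | some ts0 =>
            have hf := hv trip.2.1 ts0 hd
            rw [PySem.Dict.getD_of_get?_eq_some _ _ hd] at hts
            rw [PySem.Dict.getD_of_get?_eq_some _ _ hf]
            rw [← hts, pv_all_add, pv_all_add]
          | none =>
            have hfn : f.get? trip.2.1 = none := by
              rw [PySem.Dict.get?_eq_none_iff_not_mem_keys, ← hk,
                  ← PySem.Dict.get?_eq_none_iff_not_mem_keys]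
              exact hd
            rw [PySem.Dict.getD_of_get?_eq_none _ _ hd] at hts
            rw [PySem.Dict.getD_of_get?_eq_none _ _ hfn]
            have hadd : PySem.Set.add PySem.Set.empty (pvTypePair e2type trip.1 trip.2.2)
                = [pvTypePair e2type trip.1 trip.2.2] := rfl
            rw [← hts, hadd]
            simp
        · rw [PySem.Dict.get?_insert_of_ne _ _ hr] at hget
          rw [PySem.Dict.get?_insert_of_ne _ _ hr]
          exact hv r ts hget

-- ===== VERDICT (by name: the statement is the Claim_ definition above) =====
theorem categorize_relations_spec : Claim_equal_categorize_relations := by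
  intro tt e2 r2 cwe capec _ _
  unfold Spec_categorize_relations categorize_relations categorize_relations_alt
  dsimp only
  obtain ⟨hk, hnd, hv⟩ := pv_loop_inv e2 (pvId2Rel r2) cwe capec tt
    PySem.Dict.empty PySem.Dict.empty
    (by rw [PySem.Dict.keys_empty, PySem.Dict.keys_empty])
    (by rw [PySem.Dict.keys_empty]; exact List.nodup_nil)
    (by intro r ts h; rw [PySem.Dict.get?_empty] at h; cases h)
  set P := tt.foldl (fun d trip =>
      if PySem.Str.startswith ((pvId2Rel r2).getD trip.2.1 "") "PATH_" then d
      else d.insert trip.2.1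
        (PySem.Set.add (d.getD trip.2.1 PySem.Set.empty) (pvTypePair e2 trip.1 trip.2.2)))
      PySem.Dict.empty with hP
  set F := tt.foldl (fun f trip =>
      if PySem.Str.startswith ((pvId2Rel r2).getD trip.2.1 "") "PATH_" then f
      else
        let p := pvTypePair e2 trip.1 trip.2.2
        let pr := f.getD trip.2.1 (true, true)
        f.insert trip.2.1 (pr.1 && PySem.Set.contains (pvIntra cwe capec) p,
                           pr.2 && PySem.Set.contains (pvCross cwe capec) p))
      PySem.Dict.empty with hF
  rw [PySem.List.foldl_congr_mem P.items _
      (fun rc p => rc.insert p.1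
        (if PySem.Set.issubset p.2 (pvIntra cwe capec) then "hier"
         else if PySem.Set.issubset p.2 (pvCross cwe capec)
                 && (PySem.Set.inter p.2 (pvIntra cwe capec)).isEmpty then "direct"
         else "path")) _
      (by intro acc x _; dsimp only; split_ifs <;> rfl)]
  rw [PySem.Dict.items_foldl_insert_fresh P.items (fun p => p.1)
      (fun p => (if PySem.Set.issubset p.2 (pvIntra cwe capec) then "hier"
         else if PySem.Set.issubset p.2 (pvCross cwe capec)
                 && (PySem.Set.inter p.2 (pvIntra cwe capec)).isEmpty then "direct"
         else "path")) PySem.Dict.empty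
      (fun a _ => PySem.Dict.contains_empty a.1)
      (by
        have hkeq : P.items.map (fun p => p.1) = P.keys := rfl
        rw [hkeq]; exact hnd)]
  have hndF : F.keys.Nodup := hk ▸ hnd
  rw [PySem.Dict.items_eq_map_keys P hnd PySem.Set.empty,
      PySem.Dict.items_eq_map_keys F hndF (true, true)]
  rw [List.map_map, List.map_map, ← hk]
  have hempty : (PySem.Dict.empty : PySem.Dict Int String).items = [] := rfl
  rw [hempty, List.nil_append]
  apply List.map_congr_left
  intro k hkmem
  obtain ⟨ts, hts⟩ : ∃ ts, P.get? k = some ts := by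
    cases h : P.get? k with
    | none => exact absurd hkmem ((PySem.Dict.get?_eq_none_iff_not_mem_keys _ _).mp h)
    | some ts => exact ⟨ts, rfl⟩
  have hf := hv k ts hts
  simp only [Function.comp]
  simp only [PySem.Dict.getD_of_get?_eq_some _ _ hts, PySem.Dict.getD_of_get?_eq_some _ _ hf]
  exact congrArg (fun s => (k, s)) (pv_classify_eq cwe capec ts)
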